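-- pv_equiv track=rewrite | github.com/prashantsingh1122/trulymadly-genai-assignment | agents/planner.py | _is_plan_reasonable_for_task
-- ===== SOURCE A (Python) =====
-- def _is_plan_reasonable_for_task(task: str, plan: dict) -> bool:
--     """Check if the plan makes sense for the given task"""
--
--     task_lower = task.lower()
--     steps = plan.get("steps", [])
--
--     # Check if weather is requested but not in plan, or vice versa
--     weather_keywords = ["weather", "temperature", "climate", "forecast"]
--     github_keywords = ["github", "repository", "repo", "search", "code", "programming"]
--
--     task_requests_weather = any(keyword in task_lower for keyword in weather_keywords)
--     task_requests_github = any(keyword in task_lower for keyword in github_keywords)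
--
--     plan_has_weather = any(step.get("tool") == "weather" for step in steps)
--     plan_has_github = any(step.get("tool") == "github_search" for step in steps)
--
--     # Extract specific entities from task
--     cities = ["london", "new york", "tokyo", "mumbai", "berlin", "paris", "delhi", "prayagraj", "york"]
--     languages = ["python", "javascript", "rust", "react", "go", "java", "typescript"]
--
--     # Check for specific city mentions
--     task_city = None
--     for city in cities:
--         if city in task_lower:
--             task_city = city.title()
--             break
--
--     # Check for specific language mentions
--     task_language = None
--     for lang in languages:
--         if lang in task_lower:
--             task_language = lang
--             break
--
--     # Validate weather steps
--     if task_requests_weather and plan_has_weather: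
--         for step in steps:
--             if step.get("tool") == "weather":
--                 plan_city = step.get("city", "").lower()
--                 if task_city and task_city.lower() != plan_city:
--                     return False  # Wrong city
--
--     # Validate github steps
--     if task_requests_github and plan_has_github:
--         for step in steps:
--             if step.get("tool") == "github_search":
--                 plan_query = step.get("query", "").lower()
--                 if task_language and task_language != plan_query:
--                     return False  # Wrong language
--
--     # Basic logic check - if LLM gives generic response when specific task is given
--     if task_city and task_city.lower() != "delhi" and plan_has_weather:
--         for step in steps:
--             if step.get("tool") == "weather" and step.get("city", "").lower() == "delhi":
--                 return False  # Generic Delhi response when specific city requested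
--
--     if task_language and task_language != "python" and plan_has_github:
--         for step in steps:
--             if step.get("tool") == "github_search" and step.get("query", "").lower() == "python":
--                 return False  # Generic python response when specific language requested
--
--     return True
-- ===== SOURCE B (Python) =====
-- def _is_plan_reasonable_for_task(task: str, plan: dict) -> bool:
--     """Check if the plan makes sense for the given task (single-pass collection, then validation)"""
--     task_lower = task.lower()
--
--     # One pass over the steps: collect the (lowercased) city of every weather step
--     # and the (lowercased) query of every github_search step.
--     weather_cities = []
--     github_queries = []
--     for step in plan.get("steps", []):
--         tool = step.get("tool")
--         if tool == "weather":
--             weather_cities.append(step.get("city", "").lower())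
--         elif tool == "github_search":
--             github_queries.append(step.get("query", "").lower())
--
--     cities = ["london", "new york", "tokyo", "mumbai", "berlin", "paris", "delhi", "prayagraj", "york"]
--     languages = ["python", "javascript", "rust", "react", "go", "java", "typescript"]
--     task_city = next((c for c in cities if c in task_lower), None)
--     task_language = next((l for l in languages if l in task_lower), None)
--
--     if task_city is not None:
--         weather_keywords = ["weather", "temperature", "climate", "forecast"]
--         if any(k in task_lower for k in weather_keywords) and any(c != task_city for c in weather_cities):
--             return False  # wrong city in some weather step
--         if task_city != "delhi" and "delhi" in weather_cities:
--             return False  # generic Delhi response when a specific city was requested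
--     if task_language is not None:
--         github_keywords = ["github", "repository", "repo", "search", "code", "programming"]
--         if any(k in task_lower for k in github_keywords) and any(q != task_language for q in github_queries):
--             return False  # wrong language in some github step
--         if task_language != "python" and "python" in github_queries:
--             return False  # generic python response when a specific language was requested
--     return True
-- ===== Notes on version B (the rewrite author's own statement) =====
-- stated objective: alternative
-- what changed: B makes one pass over the steps collecting the lowercased weather cities and github queries into two lists, then runs the four validation checks against those lists, instead of A's four separate gated loops over the steps and its title()/lower() round-trip on the matched city.
import Mathlib
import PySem

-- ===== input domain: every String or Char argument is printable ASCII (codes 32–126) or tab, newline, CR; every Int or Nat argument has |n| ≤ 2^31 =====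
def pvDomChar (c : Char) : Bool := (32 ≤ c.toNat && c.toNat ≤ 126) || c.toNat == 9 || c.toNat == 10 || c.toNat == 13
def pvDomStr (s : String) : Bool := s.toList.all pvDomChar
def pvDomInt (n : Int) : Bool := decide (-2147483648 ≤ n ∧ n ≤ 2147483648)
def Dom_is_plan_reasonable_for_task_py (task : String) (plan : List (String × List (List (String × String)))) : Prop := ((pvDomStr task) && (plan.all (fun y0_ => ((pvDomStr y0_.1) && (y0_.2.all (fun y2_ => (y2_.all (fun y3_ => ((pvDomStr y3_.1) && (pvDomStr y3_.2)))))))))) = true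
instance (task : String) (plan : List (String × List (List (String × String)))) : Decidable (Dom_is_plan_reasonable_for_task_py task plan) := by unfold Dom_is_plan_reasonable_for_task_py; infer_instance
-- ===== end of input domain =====

-- B replaces A's four gated validation loops over the steps by ONE collection pass plus checks on the collected lists (alternative decomposition, same cost).

-- ===== PORT A =====

-- shared literal constants of the module
def pvCities : List String := ["london", "new york", "tokyo", "mumbai", "berlin", "paris", "delhi", "prayagraj", "york"]
def pvLangs : List String := ["python", "javascript", "rust", "react", "go", "java", "typescript"]
def pvWeatherKw : List String := ["weather", "temperature", "climate", "forecast"]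
def pvGithubKw : List String := ["github", "repository", "repo", "search", "code", "programming"]

-- hand port of str.title(): a cased char is uppercased iff the previous char is not alphabetic
-- (exact on the ASCII domain; PySem has no title primitive)
def pvTitle (s : String) : String :=
  String.ofList ((s.toList.foldl
    (fun (acc : List Char × Bool) c =>
      (acc.1 ++ [if PySem.Chars.isalpha c then
                   (if acc.2 then PySem.Chars.lowerChar c else PySem.Chars.upperChar c)
                 else c],
       PySem.Chars.isalpha c))
    ([], false)).1)

-- 'for city in cities: if city in task_lower: task_city = city.title(); break'
def pvLoopCity (xs : List String) (tl : String) : Option String :=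
  match xs with
  | [] => none
  | c :: rest => if PySem.Str.isIn c tl then some (pvTitle c) else pvLoopCity rest tl

-- 'for lang in languages: if lang in task_lower: task_language = lang; break'
def pvLoopLang (xs : List String) (tl : String) : Option String :=
  match xs with
  | [] => none
  | l :: rest => if PySem.Str.isIn l tl then some l else pvLoopLang rest tl

-- Python truthiness 'if task_city and task_city.lower() != "delhi"' (task_city is None or a nonempty titled city)
def pvCityNotDelhi : Option String → Bool
  | some tc => PySem.Str.lower tc != "delhi"
  | none => false

-- 'if task_language and task_language != "python"'
def pvLangNotPython : Option String → Bool
  | some l => l != "python"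
  | none => false

-- the weather-validation loop: returns false iff it hits 'return False'
def pvCheckWeather (steps : List (List (String × String))) (task_city : Option String) : Bool :=
  match steps with
  | [] => true
  | s :: rest =>
    if PySem.Dict.get? (PySem.Dict.mk s) "tool" == some "weather" then
      let plan_city := PySem.Str.lower (PySem.Dict.getD (PySem.Dict.mk s) "city" "")
      match task_city with
      | some tc => if PySem.Str.lower tc != plan_city then false else pvCheckWeather rest task_city
      | none => pvCheckWeather rest task_city
    else pvCheckWeather rest task_city

-- the github-validation loop
def pvCheckGithub (steps : List (List (String × String))) (task_language : Option String) : Bool :=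
  match steps with
  | [] => true
  | s :: rest =>
    if PySem.Dict.get? (PySem.Dict.mk s) "tool" == some "github_search" then
      let plan_query := PySem.Str.lower (PySem.Dict.getD (PySem.Dict.mk s) "query" "")
      match task_language with
      | some l => if l != plan_query then false else pvCheckGithub rest task_language
      | none => pvCheckGithub rest task_language
    else pvCheckGithub rest task_language

-- the generic-Delhi loop
def pvCheckDelhi (steps : List (List (String × String))) : Bool :=
  match steps with
  | [] => true
  | s :: rest =>
    if PySem.Dict.get? (PySem.Dict.mk s) "tool" == some "weather"
        && PySem.Str.lower (PySem.Dict.getD (PySem.Dict.mk s) "city" "") == "delhi" then false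
    else pvCheckDelhi rest

-- the generic-python loop
def pvCheckPython (steps : List (List (String × String))) : Bool :=
  match steps with
  | [] => true
  | s :: rest =>
    if PySem.Dict.get? (PySem.Dict.mk s) "tool" == some "github_search"
        && PySem.Str.lower (PySem.Dict.getD (PySem.Dict.mk s) "query" "") == "python" then false
    else pvCheckPython rest

def is_plan_reasonable_for_task_py (task : String) (plan : List (String × List (List (String × String)))) : Bool :=
  let task_lower := PySem.Str.lower task
  let steps := PySem.Dict.getD (PySem.Dict.mk plan) "steps" []
  let task_requests_weather := pvWeatherKw.any (fun k => PySem.Str.isIn k task_lower)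
  let task_requests_github := pvGithubKw.any (fun k => PySem.Str.isIn k task_lower)
  let plan_has_weather := steps.any (fun s => PySem.Dict.get? (PySem.Dict.mk s) "tool" == some "weather")
  let plan_has_github := steps.any (fun s => PySem.Dict.get? (PySem.Dict.mk s) "tool" == some "github_search")
  let task_city := pvLoopCity pvCities task_lower
  let task_language := pvLoopLang pvLangs task_lower
  if task_requests_weather && plan_has_weather && !(pvCheckWeather steps task_city) then false
  else if task_requests_github && plan_has_github && !(pvCheckGithub steps task_language) then false
  else if pvCityNotDelhi task_city && plan_has_weather && !(pvCheckDelhi steps) then false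
  else if pvLangNotPython task_language && plan_has_github && !(pvCheckPython steps) then false
  else true

-- ===== PORT B =====

-- one pass: collect the lowercased city of every weather step and the lowercased query of every github_search step, in order
def pvCollect : List (List (String × String)) → List String × List String
  | [] => ([], [])
  | s :: rest =>
    let acc := pvCollect rest
    if PySem.Dict.get? (PySem.Dict.mk s) "tool" == some "weather" then
      (PySem.Str.lower (PySem.Dict.getD (PySem.Dict.mk s) "city" "") :: acc.1, acc.2)
    else if PySem.Dict.get? (PySem.Dict.mk s) "tool" == some "github_search" then
      (acc.1, PySem.Str.lower (PySem.Dict.getD (PySem.Dict.mk s) "query" "") :: acc.2)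
    else acc

def is_plan_reasonable_for_task_py_alt (task : String) (plan : List (String × List (List (String × String)))) : Bool :=
  let task_lower := PySem.Str.lower task
  let cq := pvCollect (PySem.Dict.getD (PySem.Dict.mk plan) "steps" [])
  let task_city := pvCities.find? (fun c => PySem.Str.isIn c task_lower)
  let task_language := pvLangs.find? (fun l => PySem.Str.isIn l task_lower)
  let bad_city :=
    match task_city with
    | none => false
    | some c =>
      (pvWeatherKw.any (fun k => PySem.Str.isIn k task_lower) && cq.1.any (fun x => x != c))
      || (c != "delhi" && cq.1.contains "delhi")
  let bad_lang :=
    match task_language with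
    | none => false
    | some l =>
      (pvGithubKw.any (fun k => PySem.Str.isIn k task_lower) && cq.2.any (fun x => x != l))
      || (l != "python" && cq.2.contains "python")
  !(bad_city || bad_lang)

-- ===== PRECONDITION & SPEC =====
def Spec_is_plan_reasonable_for_task_py (task : String) (plan : List (String × List (List (String × String)))) (out : Bool) : Prop := out = is_plan_reasonable_for_task_py_alt task plan
instance (task : String) (plan : List (String × List (List (String × String)))) (out : Bool) : Decidable (Spec_is_plan_reasonable_for_task_py task plan out) := by unfold Spec_is_plan_reasonable_for_task_py; infer_instance

-- ===== CLAIM (what is proved, stated in full; the proofs are below) =====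
def Claim_equal_is_plan_reasonable_for_task_py : Prop := ∀ (task : String) (plan : List (String × List (List (String × String)))), Dom_is_plan_reasonable_for_task_py task plan → Spec_is_plan_reasonable_for_task_py task plan (is_plan_reasonable_for_task_py task plan)

-- ===== LEMMAS AND PROOFS =====

theorem pvLoopCity_eq (xs : List String) (tl : String) :
    pvLoopCity xs tl = (xs.find? (fun c => PySem.Str.isIn c tl)).map pvTitle := by
  induction xs with
  | nil => rfl
  | cons c rest ih =>
    cases h : PySem.Str.isIn c tl
    · simp only [pvLoopCity, h, List.find?_cons]
      simp [ih]
    · simp only [pvLoopCity, h, List.find?_cons]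
      simp

theorem pvLoopLang_eq (xs : List String) (tl : String) :
    pvLoopLang xs tl = xs.find? (fun l => PySem.Str.isIn l tl) := by
  induction xs with
  | nil => rfl
  | cons l rest ih =>
    cases h : PySem.Str.isIn l tl
    · simp only [pvLoopLang, h, List.find?_cons]
      simp [ih]
    · simp only [pvLoopLang, h, List.find?_cons]
      simp

theorem pvCheckWeather_some (steps : List (List (String × String))) (tc : String) :
    pvCheckWeather steps (some tc) = (pvCollect steps).1.all (fun x => x == PySem.Str.lower tc) := by
  induction steps with
  | nil => rfl
  | cons s rest ih =>
    rw [pvCheckWeather, pvCollect]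
    by_cases h : (PySem.Dict.get? (PySem.Dict.mk s) "tool" == some "weather") = true
    · rw [if_pos h, if_pos h]
      simp only [List.all_cons, ih]
      by_cases h2 : PySem.Str.lower (PySem.Dict.getD (PySem.Dict.mk s) "city" "") = PySem.Str.lower tc
      · simp [h2]
      · simp [bne, beq_eq_false_iff_ne.mpr h2, beq_eq_false_iff_ne.mpr (Ne.symm h2)]
    · rw [if_neg h, if_neg h]
      by_cases h3 : (PySem.Dict.get? (PySem.Dict.mk s) "tool" == some "github_search") = true
      · rw [if_pos h3]; exact ih
      · rw [if_neg h3]; exact ih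

theorem pvCheckWeather_none (steps : List (List (String × String))) :
    pvCheckWeather steps none = true := by
  induction steps with
  | nil => rfl
  | cons s rest ih => rw [pvCheckWeather]; split <;> exact ih

theorem pvCheckGithub_some (steps : List (List (String × String))) (l : String) :
    pvCheckGithub steps (some l) = (pvCollect steps).2.all (fun x => x == l) := by
  induction steps with
  | nil => rfl
  | cons s rest ih =>
    rw [pvCheckGithub, pvCollect]
    by_cases h : (PySem.Dict.get? (PySem.Dict.mk s) "tool" == some "github_search") = true
    · have hw : (PySem.Dict.get? (PySem.Dict.mk s) "tool" == some "weather") = false := by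
        rw [eq_of_beq h]; decide
      rw [if_pos h, if_neg (by simp [hw]), if_pos h]
      simp only [List.all_cons, ih]
      by_cases h2 : PySem.Str.lower (PySem.Dict.getD (PySem.Dict.mk s) "query" "") = l
      · simp [h2, bne]
      · simp [bne, beq_eq_false_iff_ne.mpr h2, beq_eq_false_iff_ne.mpr (Ne.symm h2)]
    · rw [if_neg h, if_neg h]
      by_cases h3 : (PySem.Dict.get? (PySem.Dict.mk s) "tool" == some "weather") = true
      · rw [if_pos h3]; exact ih
      · rw [if_neg h3]; exact ih

theorem pvCheckGithub_none (steps : List (List (String × String))) :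
    pvCheckGithub steps none = true := by
  induction steps with
  | nil => rfl
  | cons s rest ih => rw [pvCheckGithub]; split <;> exact ih

theorem pvCheckDelhi_eq (steps : List (List (String × String))) :
    pvCheckDelhi steps = !((pvCollect steps).1.contains "delhi") := by
  induction steps with
  | nil => rfl
  | cons s rest ih =>
    rw [pvCheckDelhi, pvCollect]
    by_cases h : (PySem.Dict.get? (PySem.Dict.mk s) "tool" == some "weather") = true
    · rw [if_pos h]
      by_cases h2 : (PySem.Str.lower (PySem.Dict.getD (PySem.Dict.mk s) "city" "") == "delhi") = true
      · have h2' := eq_of_beq h2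
        simp [h, h2']
      · have h2' : PySem.Str.lower (PySem.Dict.getD (PySem.Dict.mk s) "city" "") ≠ "delhi" := by
          simpa using h2
        simp [h, h2', Ne.symm h2', ih]
    · rw [if_neg (by simp [h]), if_neg h]
      by_cases h3 : (PySem.Dict.get? (PySem.Dict.mk s) "tool" == some "github_search") = true
      · rw [if_pos h3]; exact ih
      · rw [if_neg h3]; exact ih

theorem pvCheckPython_eq (steps : List (List (String × String))) :
    pvCheckPython steps = !((pvCollect steps).2.contains "python") := by
  induction steps with
  | nil => rfl
  | cons s rest ih =>
    rw [pvCheckPython, pvCollect]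
    by_cases h : (PySem.Dict.get? (PySem.Dict.mk s) "tool" == some "github_search") = true
    · have hw : (PySem.Dict.get? (PySem.Dict.mk s) "tool" == some "weather") = false := by
        rw [eq_of_beq h]; decide
      by_cases h2 : (PySem.Str.lower (PySem.Dict.getD (PySem.Dict.mk s) "query" "") == "python") = true
      · have h2' := eq_of_beq h2
        simp [h, hw, h2']
      · have h2' : PySem.Str.lower (PySem.Dict.getD (PySem.Dict.mk s) "query" "") ≠ "python" := by
          simpa using h2
        simp [h, hw, h2', Ne.symm h2', ih]
    · rw [if_neg (by simp [h])]
      by_cases h3 : (PySem.Dict.get? (PySem.Dict.mk s) "tool" == some "weather") = true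
      · rw [if_pos h3]; exact ih
      · rw [if_neg h3, if_neg h]; exact ih


theorem pvHasWeather_eq (steps : List (List (String × String))) :
    (steps.any (fun s => PySem.Dict.get? (PySem.Dict.mk s) "tool" == some "weather"))
      = !(pvCollect steps).1.isEmpty := by
  induction steps with
  | nil => rfl
  | cons s rest ih =>
    rw [List.any_cons, pvCollect]
    by_cases h : (PySem.Dict.get? (PySem.Dict.mk s) "tool" == some "weather") = true
    · simp [h]
    · rw [if_neg h]
      by_cases h3 : (PySem.Dict.get? (PySem.Dict.mk s) "tool" == some "github_search") = true
      · simp [h, h3, ih]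
      · simp [h, h3, ih]

theorem pvHasGithub_eq (steps : List (List (String × String))) :
    (steps.any (fun s => PySem.Dict.get? (PySem.Dict.mk s) "tool" == some "github_search"))
      = !(pvCollect steps).2.isEmpty := by
  induction steps with
  | nil => rfl
  | cons s rest ih =>
    rw [List.any_cons, pvCollect]
    by_cases h : (PySem.Dict.get? (PySem.Dict.mk s) "tool" == some "github_search") = true
    · have hw : (PySem.Dict.get? (PySem.Dict.mk s) "tool" == some "weather") = false := by
        rw [eq_of_beq h]; decide
      simp [h, hw]
    · rw [if_neg h]
      by_cases h3 : (PySem.Dict.get? (PySem.Dict.mk s) "tool" == some "weather") = true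
      · simp [h, h3, ih]
      · simp [h, h3, ih]

-- !all(= x) = any(≠ x)
theorem pvNotAll (cs : List String) (x : String) :
    (!(cs.all (fun y => y == x))) = cs.any (fun y => y != x) := by
  induction cs with
  | nil => rfl
  | cons h t ih => simp [List.all_cons, List.any_cons, Bool.not_and, ih, bne]

-- the !isEmpty gate of A is redundant once !all is turned into any(≠)
theorem pvCondW (t : Bool) (cs : List String) (x : String) :
    (t && !cs.isEmpty && !(cs.all (fun y => y == x))) = (t && cs.any (fun y => y != x)) := by
  cases cs <;> cases t <;> simp [pvNotAll, List.any_cons, bne, Bool.not_and]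

-- likewise for the contains checks
theorem pvCondD (t : Bool) (cs : List String) (x : String) :
    (t && !cs.isEmpty && cs.contains x) = (t && cs.contains x) := by
  cases cs <;> cases t <;> simp

-- A's if-chain as one negated disjunction, grouped B's way
theorem pvChain (w g d p : Bool) :
    (if w then false else if g then false else if d then false else if p then false else true)
      = !((w || d) || (g || p)) := by
  cases w <;> cases g <;> cases d <;> cases p <;> rfl

-- title().lower() is the identity on the module's (lowercase) city literals
theorem pvTitleLower (c : String) (hc : c ∈ pvCities) :
    PySem.Str.lower (pvTitle c) = c := by
  fin_cases hc <;> decide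

theorem pv_main (task : String) (plan : List (String × List (List (String × String)))) :
    is_plan_reasonable_for_task_py task plan = is_plan_reasonable_for_task_py_alt task plan := by
  unfold is_plan_reasonable_for_task_py is_plan_reasonable_for_task_py_alt
  dsimp only
  rw [pvLoopCity_eq, pvLoopLang_eq]
  set tl := PySem.Str.lower task with htl
  set steps := PySem.Dict.getD (PySem.Dict.mk plan) "steps" [] with hsteps
  rcases hfc : pvCities.find? (fun c => PySem.Str.isIn c tl) with _ | c <;>
    rcases hfl : pvLangs.find? (fun l => PySem.Str.isIn l tl) with _ | l
  · simp [pvCheckWeather_none, pvCheckGithub_none, pvCityNotDelhi, pvLangNotPython]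
  · rw [Option.map_none]
    simp only [pvCheckWeather_none, pvCheckGithub_some, pvCityNotDelhi, pvLangNotPython,
      pvCheckPython_eq, pvHasGithub_eq, Bool.not_not, Bool.not_true, Bool.and_false,
      Bool.false_and]
    rw [pvCondW, pvCondD, pvChain false _ false _]
    simp
  · rw [Option.map_some]
    simp only [pvCheckGithub_none, pvCheckWeather_some, pvCityNotDelhi, pvLangNotPython,
      pvCheckDelhi_eq, pvHasWeather_eq, Bool.not_not, Bool.not_true, Bool.and_false,
      Bool.false_and]
    rw [pvTitleLower c (List.mem_of_find?_eq_some hfc), pvCondW, pvCondD, pvChain _ false _ false]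
    simp
  · rw [Option.map_some]
    simp only [pvCheckWeather_some, pvCheckGithub_some, pvCityNotDelhi, pvLangNotPython,
      pvCheckDelhi_eq, pvCheckPython_eq, pvHasWeather_eq, pvHasGithub_eq, Bool.not_not]
    rw [pvTitleLower c (List.mem_of_find?_eq_some hfc), pvCondW, pvCondW, pvCondD, pvCondD, pvChain]

-- ===== VERDICT (by name: the statement is the Claim_ definition above) =====
theorem is_plan_reasonable_for_task_py_spec : Claim_equal_is_plan_reasonable_for_task_py := by
  intro task plan _
  unfold Spec_is_plan_reasonable_for_task_py
  exact pv_main task plan
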